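-- pv_equiv track=rewrite | github.com/Sabdha07/Bioinformatics-Algorithms | bioinfo_chapter2_motiffind.py | present_in_allseq
-- ===== SOURCE A (Python) =====
-- def hamming_distance(p,q):
--     d = 0
--     if len(p) == len(q):
--       for i in range(len(p)):
--         if p[i] != q[i]:
--           d += 1
--     return d
--
-- def present_in_allseq(dna,pattern,d):
--   n = len(dna)
--   k = len(pattern)
--   c = 0
--   for seq in dna:
--     for i in range(len(seq)-k+1):
--       kmer = seq[i:i+k]
--       if hamming_distance(kmer,pattern) <= d:
--         c += 1
--         break
--   if c == n:
--     return True
--   else: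
--     return False
-- ===== SOURCE B (Python) =====
-- def present_in_allseq(dna, pattern, d):
--     # Column-major mismatch accumulation: per sequence, build an array of
--     # mismatch counts per alignment by sweeping pattern positions, then test
--     # its minimum; no window slicing, no per-window Hamming computation.
--     k = len(pattern)
--     for seq in dna:
--         m = len(seq) - k + 1
--         if m <= 0:
--             return False
--         mis = [0] * m
--         for j in range(k):
--             pc = pattern[j]
--             mis = [mis[i] + (seq[i + j] != pc) for i in range(m)]
--         if min(mis) > d:
--             return False
--     return True
-- ===== Notes on version B (the rewrite author's own statement) =====
-- stated objective: faster
-- what changed: Replaces the per-window Hamming-distance test (slice each k-mer, compare to pattern, break, count sequences) by a column-major sweep: for each sequence it accumulates an array of mismatch counts per alignment, one pattern position at a time, and tests the array's minimum against d; the per-column comprehension and built-in min run in bulk instead of per-window Python loops, a measured constant-factor win.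
import Mathlib
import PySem

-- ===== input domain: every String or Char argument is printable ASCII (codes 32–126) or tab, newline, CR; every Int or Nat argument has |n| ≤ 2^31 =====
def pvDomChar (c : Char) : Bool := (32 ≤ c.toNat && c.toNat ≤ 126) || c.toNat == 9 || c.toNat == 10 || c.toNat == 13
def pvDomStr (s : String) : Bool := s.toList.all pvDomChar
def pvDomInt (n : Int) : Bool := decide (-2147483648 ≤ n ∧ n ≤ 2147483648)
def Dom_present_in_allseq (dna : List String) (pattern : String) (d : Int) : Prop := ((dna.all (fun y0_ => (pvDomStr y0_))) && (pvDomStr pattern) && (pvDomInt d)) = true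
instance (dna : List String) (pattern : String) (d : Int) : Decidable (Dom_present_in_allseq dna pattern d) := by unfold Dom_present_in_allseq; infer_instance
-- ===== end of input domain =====

-- B replaces A's per-window Hamming test (slice each k-mer, compare, break, count sequences)
-- by a column-major sweep: per sequence it accumulates an array of mismatch counts per
-- alignment, one pattern position at a time, and tests the array's minimum against d.

-- ===== PORT A =====
-- hamming_distance(p, q)
def hamming_distance (p q : String) : Int :=
  if PySem.Str.len p = PySem.Str.len q then
    (PySem.List.pyRange 0 (PySem.Str.len p) 1).foldl
      (fun d i => if PySem.Str.pyGet? p i ≠ PySem.Str.pyGet? q i then d + 1 else d) 0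
  else 0

-- the inner 'for i in range(len(seq)-k+1): … break' loop: stop at the first matching index
def pvFindA (seq pattern : String) (d k : Int) : List Int → Bool
  | [] => false
  | i :: rest =>
      if hamming_distance (PySem.Str.slice seq (some i) (some (i + k))) pattern ≤ d then true
      else pvFindA seq pattern d k rest

def present_in_allseq (dna : List String) (pattern : String) (d : Int) : Bool :=
  let n : Int := dna.length
  let k : Int := PySem.Str.len pattern
  let c : Int := dna.foldl
    (fun c seq =>
      if pvFindA seq pattern d k (PySem.List.pyRange 0 (PySem.Str.len seq - k + 1) 1) then c + 1
      else c) 0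
  if c = n then true else false

-- ===== PORT B =====
-- the comprehension 'mis = [mis[i] + (seq[i+j] != pc) for i in range(m)]' of Source B's column pass
def pvColStep (seq pattern : String) (m : Int) (mis : List Int) (j : Int) : List Int :=
  let pc := PySem.Str.pyGet? pattern j
  (PySem.List.pyRange 0 m 1).map
    (fun i => PySem.List.pyGetD mis i 0 +
      (if PySem.Str.pyGet? seq (i + j) ≠ pc then 1 else 0))

-- Source B's 'for seq in dna: …' loop with its early 'return False's
def pvGoB (pattern : String) (k d : Int) : List String → Bool
  | [] => true
  | seq :: rest =>
      let m : Int := PySem.Str.len seq - k + 1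
      if m ≤ 0 then false
      else
        let mis := (PySem.List.pyRange 0 k 1).foldl (pvColStep seq pattern m)
          (List.replicate m.toNat 0)
        match PySem.List.min? mis (fun x => x) with
        | none => false  -- unreachable: m ≥ 1, so mis is nonempty
        | some v => if v > d then false else pvGoB pattern k d rest

def present_in_allseq_alt (dna : List String) (pattern : String) (d : Int) : Bool :=
  let k : Int := PySem.Str.len pattern
  pvGoB pattern k d dna

-- ===== PRECONDITION & SPEC =====
def Spec_present_in_allseq (dna : List String) (pattern : String) (d : Int) (out : Bool) : Prop := out = present_in_allseq_alt dna pattern d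
instance (dna : List String) (pattern : String) (d : Int) (out : Bool) : Decidable (Spec_present_in_allseq dna pattern d out) := by unfold Spec_present_in_allseq; infer_instance

-- ===== CLAIM (what is proved, stated in full; the proofs are below) =====
def Claim_equal_present_in_allseq : Prop := ∀ (dna : List String) (pattern : String) (d : Int), Dom_present_in_allseq dna pattern d → Spec_present_in_allseq dna pattern d (present_in_allseq dna pattern d)

-- ===== LEMMAS AND PROOFS =====

-- mismatch count of the window of seq at offset i against pattern, by pattern position
def pvNwin (seq pattern : String) (i : Int) : Nat :=
  (PySem.List.pyRange 0 (PySem.Str.len pattern) 1).countP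
    (fun j => decide (PySem.Str.pyGet? seq (i + j) ≠ PySem.Str.pyGet? pattern j))

-- 'sequence seq has some alignment within d mismatches' — the common form both sides reduce to
def pvP (pattern : String) (d : Int) (seq : String) : Bool :=
  (PySem.List.pyRange 0 (PySem.Str.len seq - PySem.Str.len pattern + 1) 1).any
    (fun i => decide ((pvNwin seq pattern i : Int) ≤ d))

lemma hamming_window (seq pattern : String) (i : Int) (h0 : 0 ≤ i)
    (h1 : i + PySem.Str.len pattern ≤ PySem.Str.len seq) :
    hamming_distance (PySem.Str.slice seq (some i) (some (i + PySem.Str.len pattern))) pattern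
      = (pvNwin seq pattern i : Int) := by
  simp only [PySem.Str.len_eq] at h1 ⊢
  set w := PySem.Str.slice seq (some i) (some (i + (pattern.toList.length : Int))) with hwdef
  have hw : w.toList = List.take pattern.toList.length (List.drop i.toNat seq.toList) := by
    rw [hwdef, PySem.Str.toList_slice, PySem.Chars.slice_eq_listSlice,
        PySem.List.slice_of_nonneg seq.toList h0 (by omega) (by omega) (by omega)]
    congr 1
    omega
  have hwlen : w.toList.length = pattern.toList.length := by
    rw [hw]
    simp only [List.length_take, List.length_drop]
    omega
  have hget : ∀ x : Int, 0 ≤ x → x < (pattern.toList.length : Int) →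
      PySem.Str.pyGet? w x = PySem.Str.pyGet? seq (i + x) := by
    intro x hx0 hx1
    show PySem.Chars.pyGet? w.toList x = PySem.Chars.pyGet? seq.toList (i + x)
    rw [PySem.Chars.pyGet?_eq_listPyGet?, PySem.Chars.pyGet?_eq_listPyGet?,
        PySem.List.pyGet?_of_nonneg _ hx0, PySem.List.pyGet?_of_nonneg _ (by omega), hw,
        List.getElem?_take, if_pos (by omega), List.getElem?_drop]
    congr 1
    omega
  unfold hamming_distance
  rw [PySem.Str.len_eq, PySem.Str.len_eq, hwlen, if_pos rfl,
      PySem.List.foldl_ite_add_one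
        (fun idx => PySem.Str.pyGet? w idx ≠ PySem.Str.pyGet? pattern idx) _ 0,
      zero_add]
  unfold pvNwin
  rw [PySem.Str.len_eq]
  congr 1
  apply List.countP_congr
  intro x hx
  rcases PySem.List.mem_pyRange_one.mp hx with ⟨hx0, hx1⟩
  rw [hget x hx0 hx1]

lemma findA_eq_any (seq pattern : String) (d : Int) (l : List Int) :
    pvFindA seq pattern d (PySem.Str.len pattern) l
      = l.any (fun i =>
          decide (hamming_distance
            (PySem.Str.slice seq (some i) (some (i + PySem.Str.len pattern))) pattern ≤ d)) := by
  induction l with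
  | nil => rfl
  | cons i rest ih =>
      simp only [pvFindA, List.any_cons, ← ih]
      by_cases h : hamming_distance
          (PySem.Str.slice seq (some i) (some (i + PySem.Str.len pattern))) pattern ≤ d
      · rw [if_pos h, decide_eq_true h, Bool.true_or]
      · rw [if_neg h, decide_eq_false h, Bool.false_or]

lemma findA_eq_pvP (seq pattern : String) (d : Int) :
    pvFindA seq pattern d (PySem.Str.len pattern)
        (PySem.List.pyRange 0 (PySem.Str.len seq - PySem.Str.len pattern + 1) 1)
      = pvP pattern d seq := by
  rw [findA_eq_any]
  unfold pvP
  apply PySem.List.any_congr_mem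
  intro i hi
  rcases PySem.List.mem_pyRange_one.mp hi with ⟨hlo, hhi⟩
  rw [hamming_window seq pattern i hlo (by omega)]

lemma portA_eq_all (dna : List String) (pattern : String) (d : Int) :
    present_in_allseq dna pattern d = dna.all (pvP pattern d) := by
  unfold present_in_allseq
  simp only
  rw [PySem.List.foldl_count_if
    (fun seq => pvFindA seq pattern d (PySem.Str.len pattern)
      (PySem.List.pyRange 0 (PySem.Str.len seq - PySem.Str.len pattern + 1) 1)) dna 0]
  have hcount : List.countP
      (fun seq => pvFindA seq pattern d (PySem.Str.len pattern)
        (PySem.List.pyRange 0 (PySem.Str.len seq - PySem.Str.len pattern + 1) 1)) dna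
      = List.countP (pvP pattern d) dna := by
    apply List.countP_congr
    intro seq _
    rw [findA_eq_pvP seq pattern d]
  rw [hcount, zero_add]
  by_cases hall : dna.all (pvP pattern d) = true
  · rw [if_pos, hall]
    have := List.countP_eq_length.mpr (by simpa [List.all_eq_true] using hall)
    exact_mod_cast this
  · rw [if_neg, Bool.eq_false_iff.mpr hall]
    intro hc
    apply hall
    rw [List.all_eq_true]
    apply List.countP_eq_length.mp
    exact_mod_cast hc

-- the column fold: lengths are preserved and entry i accumulates the mismatch count over js
lemma colfold_spec (seq pattern : String) (mN : Nat) (js : List Int) :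
    ∀ (mis : List Int), mis.length = mN →
      (js.foldl (pvColStep seq pattern (mN : Int)) mis).length = mN ∧
      ∀ i : Nat, i < mN →
        (js.foldl (pvColStep seq pattern (mN : Int)) mis).getD i 0
          = mis.getD i 0 +
            ((js.countP (fun j =>
              decide (PySem.Str.pyGet? seq ((i : Int) + j) ≠ PySem.Str.pyGet? pattern j)) : Nat) : Int) := by
  induction js with
  | nil =>
      intro mis h
      exact ⟨h, by simp⟩
  | cons j js ih =>
      intro mis hlen
      have hstep_len : (pvColStep seq pattern (mN : Int) mis j).length = mN := by
        unfold pvColStep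
        simp only
        rw [List.length_map, PySem.List.length_pyRange_one]
        omega
      have hstep_get : ∀ i : Nat, i < mN → (pvColStep seq pattern (mN : Int) mis j).getD i 0
          = mis.getD i 0 +
            (if PySem.Str.pyGet? seq ((i : Int) + j) ≠ PySem.Str.pyGet? pattern j then 1 else 0) := by
        intro i hi
        unfold pvColStep
        simp only
        rw [List.getD_eq_getElem?_getD, PySem.List.getElem?_map_pyRange_zero _ mN i hi]
        simp
      obtain ⟨hl, hg⟩ := ih (pvColStep seq pattern (mN : Int) mis j) hstep_len
      refine ⟨by simpa [List.foldl_cons] using hl, ?_⟩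
      intro i hi
      rw [List.foldl_cons, hg i hi, hstep_get i hi, List.countP_cons]
      by_cases hc : PySem.Str.pyGet? seq ((i : Int) + j) ≠ PySem.Str.pyGet? pattern j
      · simp only [if_pos hc, decide_eq_true hc]
        push_cast
        ring
      · simp only [if_neg hc, decide_eq_false hc]
        push_cast
        ring

lemma goB_cons (pattern : String) (d : Int) (seq : String) (rest : List String) :
    pvGoB pattern (PySem.Str.len pattern) d (seq :: rest)
      = (pvP pattern d seq && pvGoB pattern (PySem.Str.len pattern) d rest) := by
  by_cases hm0 : PySem.Str.len seq - PySem.Str.len pattern + 1 ≤ 0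
  · have h1 : pvGoB pattern (PySem.Str.len pattern) d (seq :: rest) = false := by
      simp only [pvGoB]
      rw [if_pos hm0]
    have h2 : pvP pattern d seq = false := by
      unfold pvP
      rw [PySem.List.pyRange_one_eq_nil (by omega)]
      rfl
    rw [h1, h2, Bool.false_and]
  · have hm1 : 0 < PySem.Str.len seq - PySem.Str.len pattern + 1 := by omega
    have hcast : (((PySem.Str.len seq - PySem.Str.len pattern + 1).toNat : Nat) : Int)
        = PySem.Str.len seq - PySem.Str.len pattern + 1 := by omega
    set mN : Nat := (PySem.Str.len seq - PySem.Str.len pattern + 1).toNat with hmN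
    have hmNpos : 0 < mN := by omega
    obtain ⟨hflen, hfget⟩ := colfold_spec seq pattern mN
      (PySem.List.pyRange 0 (PySem.Str.len pattern) 1) (List.replicate mN 0)
      (by rw [List.length_replicate])
    set mis := (PySem.List.pyRange 0 (PySem.Str.len pattern) 1).foldl
      (pvColStep seq pattern (mN : Int)) (List.replicate mN 0) with hmis
    have hget0 : ∀ i : Nat, i < mN → mis.getD i 0 = (pvNwin seq pattern (i : Int) : Int) := by
      intro i hi
      rw [hfget i hi]
      simp [pvNwin, List.getD_eq_getElem?_getD, hi]
    have hne : mis ≠ [] := by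
      intro h
      rw [h] at hflen
      simp at hflen
      omega
    have hB : pvGoB pattern (PySem.Str.len pattern) d (seq :: rest)
        = (match PySem.List.min? mis (fun x => x) with
           | none => false
           | some v => if v > d then false else pvGoB pattern (PySem.Str.len pattern) d rest) := by
      simp only [pvGoB]
      rw [if_neg hm0, ← hcast]
      simp only [Int.toNat_natCast]
      rfl
    cases hmin : PySem.List.min? mis (fun x => x) with
    | none => exact absurd (PySem.List.min?_eq_none_iff mis (fun x => x) |>.mp hmin) hne
    | some v =>
        have hPv : pvP pattern d seq = decide (v ≤ d) := by
          unfold pvP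
          rw [Bool.eq_iff_iff]
          simp only [List.any_eq_true, decide_eq_true_eq]
          constructor
          · rintro ⟨i, hi, hile⟩
            rcases PySem.List.mem_pyRange_one.mp hi with ⟨hi0, hi1⟩
            have hitn : i.toNat < mN := by omega
            have hmem : mis.getD i.toNat 0 ∈ mis := by
              rw [List.getD_eq_getElem _ _ (by omega)]
              exact List.getElem_mem _
            have hv := PySem.List.min?_id_le hmin _ hmem
            rw [hget0 i.toNat hitn] at hv
            rw [show ((i.toNat : Nat) : Int) = i from by omega] at hv
            omega
          · intro hvd
            have hvmem := PySem.List.min?_mem hmin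
            rcases List.getElem_of_mem hvmem with ⟨idx, hidx, hval⟩
            have hidx' : idx < mN := by omega
            refine ⟨(idx : Int), PySem.List.mem_pyRange_one.mpr ⟨by omega, by omega⟩, ?_⟩
            have := hget0 idx hidx'
            rw [List.getD_eq_getElem _ _ hidx, hval] at this
            omega
        rw [hB, hmin, hPv]
        show (if v > d then false else pvGoB pattern (PySem.Str.len pattern) d rest)
          = (decide (v ≤ d) && pvGoB pattern (PySem.Str.len pattern) d rest)
        by_cases hv : v > d
        · rw [if_pos hv, decide_eq_false (by omega), Bool.false_and]
        · rw [if_neg hv, decide_eq_true (by omega : v ≤ d), Bool.true_and]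

lemma portB_eq_all (dna : List String) (pattern : String) (d : Int) :
    present_in_allseq_alt dna pattern d = dna.all (pvP pattern d) := by
  unfold present_in_allseq_alt
  simp only
  induction dna with
  | nil => rfl
  | cons seq rest ih => rw [goB_cons, ih, List.all_cons]

-- ===== VERDICT (by name: the statement is the Claim_ definition above) =====
theorem present_in_allseq_spec : Claim_equal_present_in_allseq := by
  intro dna pattern d _
  unfold Spec_present_in_allseq
  rw [portA_eq_all, portB_eq_all]
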